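-- pv_equiv track=rewrite | github.com/olga3n/adventofcode | 2022/day_17_pyroclastic_flow_2.py | fall_down
-- ===== SOURCE A (Python) =====
-- from typing import List, Tuple, Dict
--
-- def fall_down(
--     field: List[List[str]], figure_char: str = '@'
-- ) -> Tuple[List[List[str]], bool]:
--
--     new_field = []
--
--     for row_index, row in enumerate(field):
--         if row_index != 0 and figure_char not in field[row_index - 1]:
--             if figure_char not in row:
--                 new_field.append(row)
--                 continue
--
--         new_row = [cell if cell != figure_char else '.' for cell in row]
--
--         if row_index == 0 or figure_char not in field[row_index - 1]:
--             new_field.append(new_row)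
--             continue
--
--         for i, char in enumerate(field[row_index - 1]):
--             if char != figure_char:
--                 continue
--             if new_row[i] != '.':
--                 return field, False
--             new_row[i] = char
--
--         new_field.append(new_row)
--
--     for char in field[-1]:
--         if char == figure_char:
--             return field, False
--
--     return new_field, field != new_field
-- ===== SOURCE B (Python) =====
-- from typing import List, Tuple
--
--
-- def fall_down(
--     field: List[List[str]], figure_char: str = '@'
-- ) -> Tuple[List[List[str]], bool]:
--     n = len(field)
--
--     blocked = any(
--         cell == figure_char
--         and (r + 1 == n or field[r + 1][c] not in ('.', figure_char))
--         for r, row in enumerate(field)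
--         for c, cell in enumerate(row))
--
--     if blocked:
--         return field, False
--
--     above = [[]] + field[:-1]
--     new_field = [
--         [figure_char if c < len(prev) and prev[c] == figure_char
--          else ('.' if cell == figure_char else cell)
--          for c, cell in enumerate(row)]
--         for prev, row in zip(above, field)]
--
--     return new_field, field != new_field
-- ===== Notes on version B (the rewrite author's own statement) =====
-- stated objective: simpler
-- what changed: B replaces A's stateful row loop (early returns, in-place row mutation, trailing bottom-row check) by a pure two-phase form: one any-pass validating every figure cell's move, then a comprehension over the field zipped with its shifted copy that rebuilds the grid.
import Mathlib
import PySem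

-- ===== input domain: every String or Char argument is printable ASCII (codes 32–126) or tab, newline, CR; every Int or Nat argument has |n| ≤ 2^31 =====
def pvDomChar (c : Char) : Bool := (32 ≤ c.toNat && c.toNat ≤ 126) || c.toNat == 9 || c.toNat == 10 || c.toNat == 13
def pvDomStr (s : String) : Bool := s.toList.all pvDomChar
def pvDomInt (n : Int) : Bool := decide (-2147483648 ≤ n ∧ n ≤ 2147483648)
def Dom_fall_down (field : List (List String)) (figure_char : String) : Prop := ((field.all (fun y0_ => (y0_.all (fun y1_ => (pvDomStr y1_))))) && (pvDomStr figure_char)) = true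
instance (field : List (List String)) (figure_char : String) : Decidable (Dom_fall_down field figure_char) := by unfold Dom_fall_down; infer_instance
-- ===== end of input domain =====

-- B rebuilds the grid in one validate pass plus one pure comprehension instead of A's
-- stateful row loop with early returns and in-place mutation (objective: simpler).


-- ===== PORT A =====
-- inner loop 'for i, char in enumerate(field[row_index - 1]): …' mutating new_row;
-- none = the early 'return field, False'
def fdA_scan (fc : String) : List String → Nat → List String → Option (List String)
  | [], _, nr => some nr
  | ch :: rest, i, nr =>
      if ch ≠ fc then fdA_scan fc rest (i + 1) nr
      else if PySem.List.pyGetD nr (i : Int) "." ≠ "." then none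
      else fdA_scan fc rest (i + 1) (nr.set i ch)

-- main loop 'for row_index, row in enumerate(field)', accumulator = new_field
def fdA_rows (field : List (List String)) (fc : String) :
    List (List String) → Nat → List (List String) → Option (List (List String))
  | [], _, acc => some acc
  | row :: rest, ri, acc =>
      let prev := PySem.List.pyGetD field ((ri : Int) - 1) []
      if ri ≠ 0 ∧ fc ∉ prev ∧ fc ∉ row then
        fdA_rows field fc rest (ri + 1) (acc ++ [row])
      else
        let new_row := row.map (fun cell => if cell ≠ fc then cell else ".")
        if ri = 0 ∨ fc ∉ prev then
          fdA_rows field fc rest (ri + 1) (acc ++ [new_row])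
        else
          match fdA_scan fc prev 0 new_row with
          | none => none
          | some nr => fdA_rows field fc rest (ri + 1) (acc ++ [nr])

def fall_down (field : List (List String)) (figure_char : String) : List (List String) × Bool :=
  match fdA_rows field figure_char field 0 [] with
  | none => (field, false)
  | some nf =>
      -- 'for char in field[-1]: if char == figure_char: return field, False'
      if figure_char ∈ PySem.List.pyGetD field (-1) [] then (field, false)
      else (nf, decide (field ≠ nf))

-- ===== PORT B =====
-- 'cell == figure_char and (r + 1 == n or field[r + 1][c] not in ('.', figure_char))'
def fdB_cellBlocked (field : List (List String)) (fc : String) (n r c : Nat) (cell : String) : Bool :=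
  cell == fc &&
    (r + 1 == n ||
      (let b := PySem.List.pyGetD (PySem.List.pyGetD field ((r : Int) + 1) []) ((c : Int)) ""
       !(b == "." || b == fc)))

-- inner generator clause 'for c, cell in enumerate(row)'
def fdB_rowBlocked (field : List (List String)) (fc : String) (n r : Nat) :
    Nat → List String → Bool
  | _, [] => false
  | c, cell :: rest =>
      fdB_cellBlocked field fc n r c cell || fdB_rowBlocked field fc n r (c + 1) rest

-- outer generator clause 'for r, row in enumerate(field)' under any(...)
def fdB_blocked (field : List (List String)) (fc : String) (n : Nat) :
    Nat → List (List String) → Bool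
  | _, [] => false
  | r, row :: rest => fdB_rowBlocked field fc n r 0 row || fdB_blocked field fc n (r + 1) rest

-- '[figure_char if c < len(prev) and prev[c] == figure_char else ('.' if cell == figure_char else cell) for c, cell in enumerate(row)]'
def fdB_mergeRow (fc : String) (prev : List String) : Nat → List String → List String
  | _, [] => []
  | c, cell :: rest =>
      (if c < prev.length ∧ prev.getD c "" = fc then fc
       else if cell = fc then "." else cell) :: fdB_mergeRow fc prev (c + 1) rest

def fall_down_alt (field : List (List String)) (figure_char : String) : List (List String) × Bool :=
  let n := field.length
  if fdB_blocked field figure_char n 0 field then (field, false)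
  else
    let above := [] :: PySem.List.slice field none (some (-1))   -- [[]] + field[:-1]
    let new_field := (above.zip field).map (fun pr => fdB_mergeRow figure_char pr.1 0 pr.2)
    (new_field, decide (field ≠ new_field))

-- ===== PRECONDITION & SPEC =====
-- Pre_ excludes the empty field (A raises IndexError at field[-1]) and ragged fields where a
-- figure cell overhangs a shorter next row (there A raises IndexError at new_row[i] unless an
-- earlier collision returns first; on the excluded inputs where A does return, B returns the
-- same value — see the cite in claim.json).
def Pre_fall_down (field : List (List String)) (figure_char : String) : Prop :=
  field ≠ [] ∧ ∀ k < field.length, ∀ i < (field.getD k []).length,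
    (field.getD k []).getD i "" = figure_char → k + 1 < field.length →
      i < (field.getD (k + 1) []).length

instance (field : List (List String)) (figure_char : String) : Decidable (Pre_fall_down field figure_char) := by unfold Pre_fall_down; infer_instance

def pvWitness_fall_down : List (List String) × String := ([[".", "@"], [".", "."]], "@")

def Spec_fall_down (field : List (List String)) (figure_char : String) (out : List (List String) × Bool) : Prop := out = fall_down_alt field figure_char
instance (field : List (List String)) (figure_char : String) (out : List (List String) × Bool) : Decidable (Spec_fall_down field figure_char out) := by unfold Spec_fall_down; infer_instance

-- ===== CLAIM (what is proved, stated in full; the proofs are below) =====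
def Claim_equal_fall_down : Prop := ∀ (field : List (List String)) (figure_char : String), Dom_fall_down field figure_char → Pre_fall_down field figure_char → Spec_fall_down field figure_char (fall_down field figure_char)

-- ===== LEMMAS AND PROOFS =====

-- proof-only helpers
def clearCell (fc cell : String) : String := if cell ≠ fc then cell else "."

def clearRow (fc : String) (row : List String) : List String := row.map (clearCell fc)

def rowAt (field : List (List String)) (r : Nat) : List String := field.getD r []

def prevB (field : List (List String)) (ri : Nat) : List String :=
  if ri = 0 then [] else rowAt field (ri - 1)

def bRow (field : List (List String)) (fc : String) (ri : Nat) : List String :=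
  fdB_mergeRow fc (prevB field ri) 0 (rowAt field ri)

-- fdA_scan with the failure branch removed
def overlay (fc : String) : List String → Nat → List String → List String
  | [], _, nr => nr
  | ch :: rest, i, nr =>
      if ch ≠ fc then overlay fc rest (i + 1) nr else overlay fc rest (i + 1) (nr.set i ch)

def Low (field : List (List String)) (r c : Nat) : String := (rowAt field (r + 1)).getD c ""

theorem set_getElem?_self (l : List String) (i : Nat) (v : String) :
    (l.set i v)[i]? = l[i]?.map (fun _ => v) := by
  by_cases h : i < l.length
  · simp [List.getElem?_set_self h, List.getElem?_eq_getElem h]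
  · have h1 : l[i]? = none := List.getElem?_eq_none_iff.2 (by omega)
    have h2 : (l.set i v)[i]? = none := List.getElem?_eq_none_iff.2 (by simp; omega)
    simp [h1, h2]

def PreP (field : List (List String)) (fc : String) : Prop :=
  ∀ k i, k + 1 < field.length → i < (rowAt field k).length →
    (rowAt field k).getD i "" = fc → i < (rowAt field (k + 1)).length

-- collision while processing row rj against the figure cells of row rj-1
def ICol (field : List (List String)) (fc : String) (rj : Nat) : Prop :=
  ∃ c, ∃ (h : c < (rowAt field (rj - 1)).length),
    (rowAt field (rj - 1))[c] = fc ∧ (clearRow fc (rowAt field rj))[c]? ≠ some "."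

theorem preP_of_pre (field : List (List String)) (fc : String)
    (h : Pre_fall_down field fc) : PreP field fc := by
  intro k i hk hi hfc
  exact h.2 k (by omega) i hi hfc hk

-- elementwise description of B's row comprehension
theorem mergeRow_getElem? (fc : String) (prev : List String) :
    ∀ (row : List String) (c0 j : Nat),
      (fdB_mergeRow fc prev c0 row)[j]? =
        row[j]?.map (fun cell =>
          if c0 + j < prev.length ∧ prev.getD (c0 + j) "" = fc then fc
          else if cell = fc then "." else cell) := by
  intro row
  induction row with
  | nil => intro c0 j; simp [fdB_mergeRow]
  | cons cell rest ih =>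
      intro c0 j
      cases j with
      | zero => simp [fdB_mergeRow]
      | succ j =>
          simp only [fdB_mergeRow, List.getElem?_cons_succ]
          rw [ih (c0 + 1) j]
          have : c0 + 1 + j = c0 + (j + 1) := by omega
          rw [this]

theorem mergeRow_nil_or_no_fc (fc : String) (prev : List String)
    (h : prev = [] ∨ fc ∉ prev) :
    ∀ (row : List String) (c0 : Nat), fdB_mergeRow fc prev c0 row = clearRow fc row := by
  intro row
  induction row with
  | nil => intro c0; simp [fdB_mergeRow, clearRow]
  | cons cell rest ih =>
      intro c0
      have hcond : ¬ (c0 < prev.length ∧ prev.getD c0 "" = fc) := by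
        rintro ⟨hlt, heq⟩
        rcases h with h | h
        · simp [h] at hlt
        · rw [List.getD_eq_getElem _ _ hlt] at heq
          exact h (heq ▸ List.getElem_mem hlt)
      show (if c0 < prev.length ∧ prev.getD c0 "" = fc then fc
        else if cell = fc then "." else cell) :: fdB_mergeRow fc prev (c0 + 1) rest = _
      rw [if_neg hcond, ih]
      simp only [clearRow, List.map_cons, clearCell]
      by_cases hc : cell = fc <;> simp [hc]

theorem clearRow_of_no_fc (fc : String) (row : List String) (h : fc ∉ row) :
    clearRow fc row = row := by
  apply List.ext_getElem?
  intro j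
  simp only [clearRow, List.getElem?_map]
  cases hj : row[j]? with
  | none => rfl
  | some cell =>
      have : cell ∈ row := List.mem_of_getElem? hj
      have : cell ≠ fc := fun hh => h (hh ▸ this)
      simp [clearCell, this]

-- elementwise description of the mutated row built by A's inner loop
theorem overlay_getElem? (fc : String) :
    ∀ (prev : List String) (i0 : Nat) (nr : List String) (j : Nat),
      (overlay fc prev i0 nr)[j]? =
        if ∃ k, ∃ (h : k < prev.length), prev[k] = fc ∧ i0 + k = j
        then nr[j]?.map (fun _ => fc) else nr[j]? := by
  intro prev
  induction prev with
  | nil =>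
      intro i0 nr j
      rw [if_neg]; · rfl
      rintro ⟨k, hk, -⟩; simp at hk
  | cons ch rest ih =>
      intro i0 nr j
      by_cases hch : ch = fc
      · have hov : overlay fc (ch :: rest) i0 nr = overlay fc rest (i0 + 1) (nr.set i0 ch) := by
          simp [overlay, hch]
        rw [hov, ih]
        by_cases hj : j = i0
        · have hpos : ∃ k, ∃ (h : k < (ch :: rest).length), (ch :: rest)[k] = fc ∧ i0 + k = j :=
            ⟨0, by simp, by simpa using hch, by omega⟩
          conv_rhs => rw [if_pos hpos]
          rw [hj]
          by_cases hrest : ∃ k, ∃ (h : k < rest.length), rest[k] = fc ∧ i0 + 1 + k = i0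
          · rw [if_pos hrest, set_getElem?_self]
            cases hnr : nr[i0]? <;> simp [hch]
          · rw [if_neg hrest, set_getElem?_self]
            cases hnr : nr[i0]? <;> simp [hch]
        · have hset : (nr.set i0 ch)[j]? = nr[j]? := List.getElem?_set_ne (fun hh => hj hh.symm)
          by_cases hrest : ∃ k, ∃ (h : k < rest.length), rest[k] = fc ∧ i0 + 1 + k = j
          · rw [if_pos hrest, hset, if_pos]
            rcases hrest with ⟨k, hk, hfc, hkj⟩
            exact ⟨k + 1, by simpa using Nat.succ_lt_succ hk, by simpa using hfc, by omega⟩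
          · rw [if_neg hrest, hset, if_neg]
            rintro ⟨k, hk, hfc, hkj⟩
            cases k with
            | zero => exact hj (by omega)
            | succ k => exact hrest ⟨k, by simpa using Nat.lt_of_succ_lt_succ hk, by simpa using hfc, by omega⟩
      · have hov : overlay fc (ch :: rest) i0 nr = overlay fc rest (i0 + 1) nr := by
          simp [overlay, hch]
        rw [hov, ih]
        by_cases hrest : ∃ k, ∃ (h : k < rest.length), rest[k] = fc ∧ i0 + 1 + k = j
        · rw [if_pos hrest, if_pos]
          rcases hrest with ⟨k, hk, hfc, hkj⟩
          exact ⟨k + 1, by simpa using Nat.succ_lt_succ hk, by simpa using hfc, by omega⟩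
        · rw [if_neg hrest, if_neg]
          rintro ⟨k, hk, hfc, hkj⟩
          cases k with
          | zero => exact hch (by simpa using hfc)
          | succ k => exact hrest ⟨k, by simpa using Nat.lt_of_succ_lt_succ hk, by simpa using hfc, by omega⟩

-- A's mutated row equals B's comprehension row
theorem overlay_eq_mergeRow (fc : String) (prev row : List String) :
    overlay fc prev 0 (clearRow fc row) = fdB_mergeRow fc prev 0 row := by
  apply List.ext_getElem?
  intro j
  rw [overlay_getElem?, mergeRow_getElem?]
  simp only [Nat.zero_add]
  have hiff : (∃ k, ∃ (h : k < prev.length), prev[k] = fc ∧ k = j)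
      ↔ (j < prev.length ∧ prev.getD j "" = fc) := by
    constructor
    · rintro ⟨k, hk, hfc, hkj⟩
      subst hkj
      exact ⟨hk, by rw [List.getD_eq_getElem _ _ hk]; exact hfc⟩
    · rintro ⟨hlt, heq⟩
      rw [List.getD_eq_getElem _ _ hlt] at heq
      exact ⟨j, hlt, heq, rfl⟩
  by_cases hc : ∃ k, ∃ (h : k < prev.length), prev[k] = fc ∧ k = j
  · rw [if_pos hc]
    have hcond := hiff.1 hc
    cases hj : row[j]? with
    | none => simp [clearRow, hj]
    | some cell =>
        simp only [clearRow, List.getElem?_map, hj, Option.map_some]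
        rw [if_pos hcond]
  · rw [if_neg hc]
    have hcond : ¬ (j < prev.length ∧ prev.getD j "" = fc) := fun h => hc (hiff.2 h)
    cases hj : row[j]? with
    | none => simp [clearRow, hj]
    | some cell =>
        simp only [clearRow, List.getElem?_map, hj, Option.map_some]
        rw [if_neg hcond]
        simp only [clearCell]
        by_cases hcc : cell = fc <;> simp [hcc]

theorem scan_eq_none_iff (fc : String) :
    ∀ (prev : List String) (i0 : Nat) (nr : List String),
      (∀ k, ∀ (h : k < prev.length), prev[k] = fc → i0 + k < nr.length) →
      (fdA_scan fc prev i0 nr = none ↔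
        ∃ k, ∃ (h : k < prev.length), prev[k] = fc ∧ nr[i0 + k]? ≠ some ".") := by
  intro prev
  induction prev with
  | nil => intro i0 nr hb; simp [fdA_scan]
  | cons ch rest ih =>
      intro i0 nr hb
      have hb' : ∀ k, ∀ (h : k < rest.length), rest[k] = fc → i0 + 1 + k < nr.length := by
        intro k hk hfc
        have := hb (k + 1) (by simpa using Nat.succ_lt_succ hk) (by simpa using hfc)
        omega
      by_cases hch : ch = fc
      · have hi0 : i0 < nr.length := by
          have := hb 0 (by simp) (by simpa using hch); omega
        have hget : PySem.List.pyGetD nr (i0 : Int) "." = nr[i0] := by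
          rw [PySem.List.pyGetD_natCast, List.getD_eq_getElem _ _ hi0]
        by_cases hcol : nr[i0] = "."
        · have hstep : fdA_scan fc (ch :: rest) i0 nr = fdA_scan fc rest (i0 + 1) (nr.set i0 ch) := by
            simp [fdA_scan, hch, hget, hcol]
          have hbset : ∀ k, ∀ (h : k < rest.length), rest[k] = fc → i0 + 1 + k < (nr.set i0 ch).length := by
            intro k hk hfc; simpa using hb' k hk hfc
          rw [hstep, ih (i0 + 1) (nr.set i0 ch) hbset]
          constructor
          · rintro ⟨k, hk, hfc, hne⟩
            refine ⟨k + 1, by simpa using Nat.succ_lt_succ hk, by simpa using hfc, ?_⟩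
            rw [List.getElem?_set_ne (by omega)] at hne
            rw [show i0 + (k + 1) = i0 + 1 + k by omega]
            exact hne
          · rintro ⟨k, hk, hfc, hne⟩
            cases k with
            | zero =>
                exact absurd (by simp [List.getElem?_eq_getElem hi0, hcol]) hne
            | succ k =>
                refine ⟨k, by simpa using Nat.lt_of_succ_lt_succ hk, by simpa using hfc, ?_⟩
                rw [List.getElem?_set_ne (by omega)]
                rw [show i0 + 1 + k = i0 + (k + 1) by omega]
                exact hne
        · have hstep : fdA_scan fc (ch :: rest) i0 nr = none := by
            simp [fdA_scan, hch, hget, hcol]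
          rw [hstep]
          refine ⟨fun _ => ?_, fun _ => rfl⟩
          exact ⟨0, by simp, by simpa using hch, by simp [List.getElem?_eq_getElem hi0, hcol]⟩
      · have hstep : fdA_scan fc (ch :: rest) i0 nr = fdA_scan fc rest (i0 + 1) nr := by
          simp [fdA_scan, hch]
        rw [hstep, ih (i0 + 1) nr hb']
        constructor
        · rintro ⟨k, hk, hfc, hne⟩
          refine ⟨k + 1, by simpa using Nat.succ_lt_succ hk, by simpa using hfc, ?_⟩
          rw [show i0 + (k + 1) = i0 + 1 + k by omega]; exact hne
        · rintro ⟨k, hk, hfc, hne⟩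
          cases k with
          | zero => exact absurd (by simpa using hfc) hch
          | succ k =>
              refine ⟨k, by simpa using Nat.lt_of_succ_lt_succ hk, by simpa using hfc, ?_⟩
              rw [show i0 + 1 + k = i0 + (k + 1) by omega]; exact hne

theorem scan_eq_overlay (fc : String) :
    ∀ (prev : List String) (i0 : Nat) (nr : List String),
      fdA_scan fc prev i0 nr ≠ none →
      fdA_scan fc prev i0 nr = some (overlay fc prev i0 nr) := by
  intro prev
  induction prev with
  | nil => intro i0 nr _; simp [fdA_scan, overlay]
  | cons ch rest ih =>
      intro i0 nr hne
      by_cases hch : ch = fc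
      · by_cases hcol : PySem.List.pyGetD nr (i0 : Int) "." = "."
        · have hstep : fdA_scan fc (ch :: rest) i0 nr = fdA_scan fc rest (i0 + 1) (nr.set i0 ch) := by
            simp [fdA_scan, hch, hcol]
          have hov : overlay fc (ch :: rest) i0 nr = overlay fc rest (i0 + 1) (nr.set i0 ch) := by
            simp [overlay, hch]
          rw [hstep] at hne ⊢
          rw [hov]
          exact ih (i0 + 1) _ hne
        · have hcol' : ¬ nr[i0]?.getD "." = "." := by simpa using hcol
          exact absurd (by simp [fdA_scan, hch, hcol']) hne
      · have hstep : fdA_scan fc (ch :: rest) i0 nr = fdA_scan fc rest (i0 + 1) nr := by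
          simp [fdA_scan, hch]
        have hov : overlay fc (ch :: rest) i0 nr = overlay fc rest (i0 + 1) nr := by
          simp [overlay, hch]
        rw [hstep] at hne ⊢
        rw [hov]
        exact ih (i0 + 1) nr hne

theorem clearRow_def (fc : String) (row : List String) :
    row.map (fun cell => if cell ≠ fc then cell else ".") = clearRow fc row := rfl

-- one step of A's main loop: either a collision ends it, or it appends exactly B's row
theorem rows_step (field : List (List String)) (fc : String) (hP : PreP field fc)
    (ri : Nat) (acc : List (List String)) (hri : ri < field.length) :
    (1 ≤ ri ∧ ICol field fc ri ∧ fdA_rows field fc (field.drop ri) ri acc = none)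
    ∨ (¬ (1 ≤ ri ∧ ICol field fc ri) ∧ fdA_rows field fc (field.drop ri) ri acc
        = fdA_rows field fc (field.drop (ri + 1)) (ri + 1) (acc ++ [bRow field fc ri])) := by
  have hrow : field[ri] = rowAt field ri := (List.getD_eq_getElem field [] hri).symm
  have hdrop : field.drop ri = field[ri] :: field.drop (ri + 1) := List.drop_eq_getElem_cons hri
  rw [hdrop]
  by_cases hri0 : ri = 0
  · subst hri0
    right
    refine ⟨by omega, ?_⟩
    simp only [fdA_rows]
    rw [if_pos (Or.inl trivial)]
    rw [clearRow_def, hrow]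
    have : bRow field fc 0 = clearRow fc (rowAt field 0) := by
      rw [bRow, prevB, if_pos rfl]
      exact mergeRow_nil_or_no_fc fc [] (Or.inl rfl) _ 0
    rw [this, if_neg (by simp)]
  · have hprev : PySem.List.pyGetD field ((ri : Int) - 1) [] = rowAt field (ri - 1) := by
      rw [show ((ri : Int) - 1) = (((ri - 1 : Nat)) : Int) by omega, PySem.List.pyGetD_natCast]
      rfl
    simp only [fdA_rows, hprev, clearRow_def]
    by_cases hmem : fc ∈ rowAt field (ri - 1)
    · rw [if_neg (by tauto), if_neg (by tauto)]
      have hb : ∀ k, ∀ (h : k < (rowAt field (ri - 1)).length), (rowAt field (ri - 1))[k] = fc →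
          0 + k < (clearRow fc field[ri]).length := by
        intro k hk hfc
        have h1 := hP (ri - 1) k (by omega) hk (by rw [List.getD_eq_getElem _ _ hk]; exact hfc)
        rw [show ri - 1 + 1 = ri by omega] at h1
        simpa [clearRow, hrow] using h1
      by_cases hcol : ICol field fc ri
      · left
        refine ⟨by omega, hcol, ?_⟩
        have hnone : fdA_scan fc (rowAt field (ri - 1)) 0 (clearRow fc field[ri]) = none := by
          rw [scan_eq_none_iff fc _ 0 _ hb]
          rcases hcol with ⟨c, hc, hfc, hnd⟩
          exact ⟨c, hc, hfc, by simpa [hrow] using hnd⟩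
        rw [hnone]
      · right
        refine ⟨by tauto, ?_⟩
        have hsne : fdA_scan fc (rowAt field (ri - 1)) 0 (clearRow fc field[ri]) ≠ none := by
          intro h
          rw [scan_eq_none_iff fc _ 0 _ hb] at h
          rcases h with ⟨c, hc, hfc, hnd⟩
          exact hcol ⟨c, hc, hfc, by simpa [hrow] using hnd⟩
        rw [scan_eq_overlay fc _ 0 _ hsne]
        have hbr : bRow field fc ri = fdB_mergeRow fc (rowAt field (ri - 1)) 0 (rowAt field ri) := by
          rw [bRow, prevB, if_neg hri0]
        rw [hrow, hbr, ← overlay_eq_mergeRow]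
    · right
      have hnc : ¬ (1 ≤ ri ∧ ICol field fc ri) := by
        rintro ⟨-, c, hc, hfc, -⟩
        exact hmem (hfc ▸ List.getElem_mem hc)
      refine ⟨hnc, ?_⟩
      have hbrow : bRow field fc ri = clearRow fc (rowAt field ri) := by
        rw [bRow, prevB, if_neg hri0]
        exact mergeRow_nil_or_no_fc fc _ (Or.inr hmem) _ 0
      by_cases hrmem : fc ∈ field[ri]
      · rw [if_neg (by tauto), if_pos (Or.inr hmem)]
        rw [hrow, hbrow]
      · rw [if_pos ⟨hri0, hmem, hrmem⟩]
        congr 1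
        rw [hbrow, clearRow_of_no_fc fc _ (by rwa [← hrow]), hrow]

theorem rows_none_iff (field : List (List String)) (fc : String) (hP : PreP field fc) :
    ∀ (m ri : Nat) (acc : List (List String)), field.length - ri = m →
      (fdA_rows field fc (field.drop ri) ri acc = none ↔
        ∃ rj, ri ≤ rj ∧ rj < field.length ∧ 1 ≤ rj ∧ ICol field fc rj) := by
  intro m
  induction m with
  | zero =>
      intro ri acc hm
      rw [List.drop_eq_nil_of_le (by omega)]
      constructor
      · intro h; simp [fdA_rows] at h
      · rintro ⟨rj, h1, h2, -⟩; omega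
  | succ m ih =>
      intro ri acc hm
      have hri : ri < field.length := by omega
      rcases rows_step field fc hP ri acc hri with ⟨hri1, hcol, heq⟩ | ⟨hnc, heq⟩
      · rw [heq]
        exact ⟨fun _ => ⟨ri, le_refl _, hri, hri1, hcol⟩, fun _ => rfl⟩
      · rw [heq, ih (ri + 1) (acc ++ [bRow field fc ri]) (by omega)]
        constructor
        · rintro ⟨rj, h1, h2, h3, h4⟩; exact ⟨rj, by omega, h2, h3, h4⟩
        · rintro ⟨rj, h1, h2, h3, h4⟩
          refine ⟨rj, ?_, h2, h3, h4⟩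
          by_cases he : rj = ri
          · exact absurd ⟨by omega, he ▸ h4⟩ hnc
          · omega

theorem rows_some (field : List (List String)) (fc : String) (hP : PreP field fc) :
    ∀ (m ri : Nat) (acc : List (List String)), field.length - ri = m →
      (¬ ∃ rj, ri ≤ rj ∧ rj < field.length ∧ 1 ≤ rj ∧ ICol field fc rj) →
      fdA_rows field fc (field.drop ri) ri acc
        = some (acc ++ (List.range' ri (field.length - ri)).map (bRow field fc)) := by
  intro m
  induction m with
  | zero =>
      intro ri acc hm hno
      rw [List.drop_eq_nil_of_le (by omega), show field.length - ri = 0 by omega]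
      simp [fdA_rows]
  | succ m ih =>
      intro ri acc hm hno
      have hri : ri < field.length := by omega
      rcases rows_step field fc hP ri acc hri with ⟨hri1, hcol, heq⟩ | ⟨hnc, heq⟩
      · exact absurd ⟨ri, le_refl _, hri, hri1, hcol⟩ hno
      · rw [heq, ih (ri + 1) _ (by omega)
          (fun ⟨rj, h1, h2, h3, h4⟩ => hno ⟨rj, by omega, h2, h3, h4⟩)]
        congr 1
        rw [show field.length - ri = (field.length - (ri + 1)) + 1 by omega, List.range'_succ,
          List.map_cons, List.append_cons]
        simp

theorem cellBlocked_iff (field : List (List String)) (fc : String) (n r c : Nat) (cell : String) :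
    fdB_cellBlocked field fc n r c cell = true ↔
      (cell = fc ∧ (r + 1 = n ∨ (Low field r c ≠ "." ∧ Low field r c ≠ fc))) := by
  have h1 : ((r : Int) + 1) = (((r + 1 : Nat)) : Int) := by push_cast; ring
  unfold fdB_cellBlocked
  rw [h1, PySem.List.pyGetD_natCast, PySem.List.pyGetD_natCast]
  simp only [Low, rowAt, Bool.and_eq_true, Bool.or_eq_true, beq_iff_eq, Bool.not_eq_true',
    Bool.or_eq_false_iff, beq_eq_false_iff_ne, ne_eq]

theorem rowBlocked_iff (field : List (List String)) (fc : String) (n r : Nat) :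
    ∀ (row : List String) (c0 : Nat),
      fdB_rowBlocked field fc n r c0 row = true ↔
        ∃ k, ∃ (h : k < row.length), fdB_cellBlocked field fc n r (c0 + k) row[k] = true := by
  intro row
  induction row with
  | nil => intro c0; simp [fdB_rowBlocked]
  | cons cell rest ih =>
      intro c0
      rw [fdB_rowBlocked, Bool.or_eq_true, ih (c0 + 1)]
      constructor
      · rintro (h | ⟨k, hk, h⟩)
        · exact ⟨0, by simp, by simpa using h⟩
        · exact ⟨k + 1, by simpa using Nat.succ_lt_succ hk,
            by simpa [show c0 + (k + 1) = c0 + 1 + k by omega] using h⟩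
      · rintro ⟨k, hk, h⟩
        cases k with
        | zero => exact Or.inl (by simpa using h)
        | succ k =>
            exact Or.inr ⟨k, by simpa using Nat.lt_of_succ_lt_succ hk,
              by simpa [show c0 + 1 + k = c0 + (k + 1) by omega] using h⟩

theorem blocked_iff (field : List (List String)) (fc : String) (n : Nat) :
    ∀ (rows : List (List String)) (r0 : Nat),
      fdB_blocked field fc n r0 rows = true ↔
        ∃ k, ∃ (h : k < rows.length), fdB_rowBlocked field fc n (r0 + k) 0 rows[k] = true := by
  intro rows
  induction rows with
  | nil => intro r0; simp [fdB_blocked]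
  | cons row rest ih =>
      intro r0
      rw [fdB_blocked, Bool.or_eq_true, ih (r0 + 1)]
      constructor
      · rintro (h | ⟨k, hk, h⟩)
        · exact ⟨0, by simp, by simpa using h⟩
        · exact ⟨k + 1, by simpa using Nat.succ_lt_succ hk,
            by simpa [show r0 + (k + 1) = r0 + 1 + k by omega] using h⟩
      · rintro ⟨k, hk, h⟩
        cases k with
        | zero => exact Or.inl (by simpa using h)
        | succ k =>
            exact Or.inr ⟨k, by simpa using Nat.lt_of_succ_lt_succ hk,
              by simpa [show r0 + 1 + k = r0 + (k + 1) by omega] using h⟩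

theorem clear_ne_dot_iff (field : List (List String)) (fc : String) (rj c : Nat)
    (hc : c < (rowAt field rj).length) :
    ((clearRow fc (rowAt field rj))[c]? ≠ some "." ↔
      ((rowAt field rj)[c] ≠ "." ∧ (rowAt field rj)[c] ≠ fc)) := by
  have : (clearRow fc (rowAt field rj))[c]? = some (clearCell fc (rowAt field rj)[c]) := by
    simp [clearRow, List.getElem?_eq_getElem hc]
  rw [this]
  simp only [clearCell]
  by_cases h : (rowAt field rj)[c] = fc
  · simp [h]
  · simp [h]

theorem rowAt_eq (field : List (List String)) (r : Nat) (hr : r < field.length) :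
    rowAt field r = field[r] := List.getD_eq_getElem field [] hr

-- B's any-pass is equivalent to "some internal collision or a figure cell in the bottom row"
theorem blockedB_iff_main (field : List (List String)) (fc : String)
    (hne : field ≠ []) (hP : PreP field fc) :
    (fdB_blocked field fc field.length 0 field = true ↔
      ((∃ rj, rj < field.length ∧ 1 ≤ rj ∧ ICol field fc rj)
        ∨ fc ∈ rowAt field (field.length - 1))) := by
  have hlen : 1 ≤ field.length := by
    cases field with
    | nil => exact absurd rfl hne
    | cons a l => simp
  rw [blocked_iff]
  constructor
  · rintro ⟨r, hr, hrb⟩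
    rw [rowBlocked_iff] at hrb
    rcases hrb with ⟨c, hc, hcell⟩
    rw [cellBlocked_iff] at hcell
    rcases hcell with ⟨hfc, hdisj⟩
    simp only [Nat.zero_add] at hfc hdisj
    by_cases hlast : r + 1 = field.length
    · right
      have hmem : fc ∈ field[r] := hfc ▸ List.getElem_mem hc
      rw [show field.length - 1 = r by omega, rowAt_eq field r hr]
      exact hmem
    · left
      have ⟨hd1, hd2⟩ := hdisj.resolve_left hlast
      have hclen : c < (rowAt field r).length := by rw [rowAt_eq field r hr]; exact hc
      have hr1 : r + 1 < field.length := by omega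
      have hc1 : c < (rowAt field (r + 1)).length := by
        apply hP r c hr1 hclen
        rw [List.getD_eq_getElem _ _ hclen]
        simp only [rowAt_eq field r hr]
        exact hfc
      refine ⟨r + 1, hr1, by omega, c, hclen, ?_, ?_⟩
      · show (rowAt field r)[c] = fc
        simp only [rowAt_eq field r hr]
        exact hfc
      · rw [clear_ne_dot_iff field fc (r + 1) c hc1]
        have hlow : Low field r c = (rowAt field (r + 1))[c] := by
          rw [Low, List.getD_eq_getElem _ _ hc1]
        rw [hlow] at hd1 hd2
        exact ⟨hd1, hd2⟩
  · rintro (⟨rj, hrj, hrj1, c, hc, hfc, hnd⟩ | hmem)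
    · have hr : rj - 1 < field.length := by omega
      refine ⟨rj - 1, hr, ?_⟩
      rw [rowBlocked_iff]
      have hc' : c < field[rj - 1].length := by rw [← rowAt_eq field (rj - 1) hr]; exact hc
      refine ⟨c, hc', ?_⟩
      rw [cellBlocked_iff]
      simp only [Nat.zero_add]
      have hc1 : c < (rowAt field rj).length := by
        have := hP (rj - 1) c (by omega) hc (by rw [List.getD_eq_getElem _ _ hc]; exact hfc)
        rwa [show rj - 1 + 1 = rj by omega] at this
      constructor
      · simp only [← rowAt_eq field (rj - 1) hr]
        exact hfc
      · right
        rw [show rj = rj - 1 + 1 by omega] at hc1 hnd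
        rw [clear_ne_dot_iff field fc (rj - 1 + 1) c hc1] at hnd
        have hlow : Low field (rj - 1) c = (rowAt field (rj - 1 + 1))[c] := by
          rw [Low, List.getD_eq_getElem _ _ hc1]
        rw [hlow]
        exact hnd
    · have hr : field.length - 1 < field.length := by omega
      refine ⟨field.length - 1, hr, ?_⟩
      rw [rowBlocked_iff]
      have hmem' : fc ∈ field[field.length - 1] := by
        rw [← rowAt_eq field (field.length - 1) hr]; exact hmem
      rcases List.getElem_of_mem hmem' with ⟨c, hc, hfc⟩
      refine ⟨c, hc, ?_⟩
      rw [cellBlocked_iff]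
      simp only [Nat.zero_add]
      exact ⟨hfc, Or.inl (by omega)⟩

-- both programs build the same moved grid
theorem build_eq (field : List (List String)) (fc : String) (hne : field ≠ []) :
    (List.range' 0 field.length).map (bRow field fc)
      = ((([] : List String) :: PySem.List.slice field none (some (-1))).zip field).map
          (fun pr => fdB_mergeRow fc pr.1 0 pr.2) := by
  have hlen : 1 ≤ field.length := by
    cases field with
    | nil => exact absurd rfl hne
    | cons a l => simp
  rw [PySem.List.slice_to_neg_one]
  apply List.ext_getElem
  · simp [List.length_dropLast]; omega
  · intro i h1 h2
    have hi : i < field.length := by simpa using h1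
    have hzlen : i < ((([] : List String) :: field.dropLast).zip field).length := by
      simpa using h2
    rw [List.getElem_map, List.getElem_map, List.getElem_range'
      , List.getElem_zip]
    simp only [Nat.zero_add, Nat.one_mul]
    have hfst : (([] : List String) :: field.dropLast)[i]'(by simp [List.length_dropLast]; omega)
        = prevB field i := by
      cases i with
      | zero => simp [prevB]
      | succ j =>
          simp only [List.getElem_cons_succ, prevB]
          rw [if_neg (by omega), List.getElem_dropLast]
          exact (List.getD_eq_getElem field [] (by omega)).symm
    have hsnd : field[i] = rowAt field i := (List.getD_eq_getElem field [] hi).symm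
    rw [bRow]
    congr 1
    · exact hfst.symm
    · exact hsnd.symm

-- ===== VERDICT (by name: the statement is the Claim_ definition above) =====
theorem fall_down_spec : Claim_equal_fall_down := by
  unfold Claim_equal_fall_down
  intro field fc _ hpre
  unfold Spec_fall_down
  have hne : field ≠ [] := hpre.1
  have hP : PreP field fc := preP_of_pre field fc hpre
  have hlen : 1 ≤ field.length := by
    cases field with
    | nil => exact absurd rfl hne
    | cons a l => simp
  have hnone := rows_none_iff field fc hP field.length 0 [] (by omega)
  have hsome := rows_some field fc hP field.length 0 [] (by omega)
  rw [List.drop_zero] at hnone hsome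
  have hlast : PySem.List.pyGetD field (-1) [] = rowAt field (field.length - 1) := by
    rw [PySem.List.pyGetD_neg_one field [] hne, List.getLast_eq_getElem]
    exact (rowAt_eq field (field.length - 1) (by omega)).symm
  simp only [fall_down, fall_down_alt]
  by_cases hB : fdB_blocked field fc field.length 0 field = true
  · rw [if_pos hB]
    rcases (blockedB_iff_main field fc hne hP).mp hB with ⟨rj, h2, h3, h4⟩ | hmem
    · rw [hnone.mpr ⟨rj, by omega, h2, h3, h4⟩]
    · by_cases hC : ∃ rj, 0 ≤ rj ∧ rj < field.length ∧ 1 ≤ rj ∧ ICol field fc rj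
      · rw [hnone.mpr hC]
      · simp only [hsome hC, hlast]
        rw [if_pos hmem]
  · rw [if_neg hB]
    have hor : ¬ ((∃ rj, rj < field.length ∧ 1 ≤ rj ∧ ICol field fc rj)
        ∨ fc ∈ rowAt field (field.length - 1)) :=
      fun h => hB ((blockedB_iff_main field fc hne hP).mpr h)
    have hnoc : ¬ ∃ rj, 0 ≤ rj ∧ rj < field.length ∧ 1 ≤ rj ∧ ICol field fc rj := by
      rintro ⟨rj, h1, h2, h3, h4⟩
      exact hor (Or.inl ⟨rj, h2, h3, h4⟩)
    have hnm : fc ∉ rowAt field (field.length - 1) := fun h => hor (Or.inr h)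
    simp only [hsome hnoc, hlast]
    rw [if_neg hnm]
    have hb := build_eq field fc hne
    simp only [List.nil_append, Nat.sub_zero]
    simp only [hb]
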